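-- pv_equiv track=rewrite | github.com/mindstxrm/Geopolitiko | app/jobs/impact.py | _score_from_topics
-- ===== SOURCE A (Python) =====
-- def _score_from_topics(topics: list[str]) -> int:
--     """Rule-based impact 0-10. Returns 2, 5, or 8 for low, mid, high."""
--     if not topics:
--         return 2
--     high = {"Russia-Ukraine", "US-China", "Middle East", "NATO"}
--     if any(t in high for t in topics):
--         return 8
--     mid = {"Climate & Energy", "Trade & Economy", "Defense", "Asia-Pacific"}
--     if any(t in mid for t in topics):
--         return 5
--     return 2
-- ===== SOURCE B (Python) =====
-- _IMPACT = {
--     "Russia-Ukraine": 8, "US-China": 8, "Middle East": 8, "NATO": 8,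
--     "Climate & Energy": 5, "Trade & Economy": 5, "Defense": 5, "Asia-Pacific": 5,
-- }
--
--
-- def _score_from_topics(topics: list[str]) -> int:
--     """Rule-based impact 0-10. Returns 2, 5, or 8 for low, mid, high."""
--     return max((_IMPACT.get(t, 2) for t in topics), default=2)
-- ===== Notes on version B (the rewrite author's own statement) =====
-- stated objective: simpler
-- what changed: Replaced the empty-check plus two sequential any()-over-set scans with a single score table and one max-reduction pass (default=2 covers empty and no-special-topic inputs).
import Mathlib
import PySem

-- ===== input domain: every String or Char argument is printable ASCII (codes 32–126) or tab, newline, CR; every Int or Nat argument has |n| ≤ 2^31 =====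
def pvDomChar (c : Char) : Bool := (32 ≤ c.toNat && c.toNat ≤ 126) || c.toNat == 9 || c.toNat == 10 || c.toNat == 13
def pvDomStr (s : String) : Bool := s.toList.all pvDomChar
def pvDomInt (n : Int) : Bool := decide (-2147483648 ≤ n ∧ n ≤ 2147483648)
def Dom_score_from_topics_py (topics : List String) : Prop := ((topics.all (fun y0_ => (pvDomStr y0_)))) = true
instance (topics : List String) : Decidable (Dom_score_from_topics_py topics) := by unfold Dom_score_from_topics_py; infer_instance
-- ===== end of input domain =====

-- B replaces the empty-check plus two any()-over-set scans by one score table and a single max-reduction pass (simpler decomposition).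

-- ===== PORT A =====
def score_from_topics_py (topics : List String) : Int :=
  if topics = [] then 2
  else
    let high : PySem.Set String :=
      PySem.Set.ofList ["Russia-Ukraine", "US-China", "Middle East", "NATO"]
    if topics.any (fun t => PySem.Set.contains high t) then 8
    else
      let mid : PySem.Set String :=
        PySem.Set.ofList ["Climate & Energy", "Trade & Economy", "Defense", "Asia-Pacific"]
      if topics.any (fun t => PySem.Set.contains mid t) then 5
      else 2

-- ===== PORT B =====
def pvImpactTable : PySem.Dict String Int :=
  PySem.Dict.ofList
    [("Russia-Ukraine", 8), ("US-China", 8), ("Middle East", 8), ("NATO", 8),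
     ("Climate & Energy", 5), ("Trade & Economy", 5), ("Defense", 5), ("Asia-Pacific", 5)]

def score_from_topics_py_alt (topics : List String) : Int :=
  match PySem.List.max? (topics.map (fun t => pvImpactTable.getD t 2)) (fun x => x) with
  | none => 2
  | some v => v

-- ===== PRECONDITION & SPEC =====
def Spec_score_from_topics_py (topics : List String) (out : Int) : Prop := out = score_from_topics_py_alt topics
instance (topics : List String) (out : Int) : Decidable (Spec_score_from_topics_py topics out) := by unfold Spec_score_from_topics_py; infer_instance

-- ===== CLAIM (what is proved, stated in full; the proofs are below) =====
def Claim_equal_score_from_topics_py : Prop := ∀ (topics : List String), Dom_score_from_topics_py topics → Spec_score_from_topics_py topics (score_from_topics_py topics)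

-- ===== LEMMAS AND PROOFS =====

-- per-topic score of B's table, phrased through A's two membership tests
theorem pv_score_eq (x : String) :
    pvImpactTable.getD x 2 =
      (if PySem.Set.contains (PySem.Set.ofList ["Russia-Ukraine", "US-China", "Middle East", "NATO"]) x then (8 : Int)
       else if PySem.Set.contains (PySem.Set.ofList ["Climate & Energy", "Trade & Economy", "Defense", "Asia-Pacific"]) x then 5
       else 2) := by
  by_cases h1 : x = "Russia-Ukraine"; · subst h1; decide
  by_cases h2 : x = "US-China"; · subst h2; decide
  by_cases h3 : x = "Middle East"; · subst h3; decide
  by_cases h4 : x = "NATO"; · subst h4; decide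
  by_cases h5 : x = "Climate & Energy"; · subst h5; decide
  by_cases h6 : x = "Trade & Economy"; · subst h6; decide
  by_cases h7 : x = "Defense"; · subst h7; decide
  by_cases h8 : x = "Asia-Pacific"; · subst h8; decide
  simp only [pvImpactTable, PySem.Dict.ofList, PySem.Dict.update, List.foldl_cons, List.foldl_nil,
             PySem.Dict.getD_insert, PySem.Dict.getD_empty, PySem.Set.contains, PySem.Set.ofList,
             PySem.Set.add]
  simp [h1, h2, h3, h4, h5, h6, h7, h8, Ne.symm]

-- running-max invariant: folding B's scores from an accumulator ≥ 2 yields A's three-way verdict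
theorem pv_fold_eq (l : List String) : ∀ (a : Int), 2 ≤ a →
    List.foldl max a (l.map (fun t => pvImpactTable.getD t 2)) =
      (if l.any (fun t => PySem.Set.contains (PySem.Set.ofList ["Russia-Ukraine", "US-China", "Middle East", "NATO"]) t) then max a 8
       else if l.any (fun t => PySem.Set.contains (PySem.Set.ofList ["Climate & Energy", "Trade & Economy", "Defense", "Asia-Pacific"]) t) then max a 5
       else a) := by
  induction l with
  | nil => intro a ha; simp
  | cons x l ih =>
    intro a ha
    have hx := pv_score_eq x
    simp only [List.map_cons, List.foldl_cons, List.any_cons]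
    rw [ih (max a (pvImpactTable.getD x 2)) (by omega)]
    by_cases h8 : PySem.Set.contains (PySem.Set.ofList ["Russia-Ukraine", "US-China", "Middle East", "NATO"]) x = true <;>
      by_cases h5 : PySem.Set.contains (PySem.Set.ofList ["Climate & Energy", "Trade & Economy", "Defense", "Asia-Pacific"]) x = true <;>
        (first
          | rw [Bool.not_eq_true] at h8 h5
          | rw [Bool.not_eq_true] at h8
          | rw [Bool.not_eq_true] at h5
          | skip) <;>
        (rw [hx]; simp only [h8, h5, Bool.true_or, Bool.false_or, Bool.false_eq_true,
           if_true, if_false]; split_ifs <;> omega)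

-- ===== VERDICT (by name: the statement is the Claim_ definition above) =====
theorem score_from_topics_py_spec : Claim_equal_score_from_topics_py := by
  intro topics _
  unfold Spec_score_from_topics_py score_from_topics_py score_from_topics_py_alt
  cases topics with
  | nil => simp [PySem.List.max?]
  | cons x l =>
    rw [List.map_cons, PySem.List.max?_id_cons]
    simp only [List.cons_ne_self, if_neg, reduceCtorEq, ite_false]
    rw [pv_fold_eq l (pvImpactTable.getD x 2) (by rw [pv_score_eq x]; split_ifs <;> omega)]
    have hx := pv_score_eq x
    simp only [List.any_cons]
    by_cases h8 : PySem.Set.contains (PySem.Set.ofList ["Russia-Ukraine", "US-China", "Middle East", "NATO"]) x = true <;>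
      by_cases h5 : PySem.Set.contains (PySem.Set.ofList ["Climate & Energy", "Trade & Economy", "Defense", "Asia-Pacific"]) x = true <;>
        (first
          | rw [Bool.not_eq_true] at h8 h5
          | rw [Bool.not_eq_true] at h8
          | rw [Bool.not_eq_true] at h5
          | skip) <;>
        (rw [hx]; simp only [h8, h5, Bool.true_or, Bool.false_or, Bool.false_eq_true,
           if_true, if_false]; split_ifs <;> omega)
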